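-- pv_equiv track=rewrite | github.com/CodyBuilder-dev/Algorithm-Coding-Test | problems/programmers/lv4/pgs-12984-dp.py | solution
-- ===== SOURCE A (Python) =====
-- def solution(land, P, Q):
--     flatten_land = []
--     for row in land:
--         flatten_land += row
--     n = len(flatten_land)
--     flatten_land = sorted(flatten_land)
--     total_block = sum(flatten_land)
--     min_height = flatten_land[0]
--     max_height = flatten_land[-1]
--
--     # 모든 층에 대해 비용을 계산
--     cost = Q*(total_block - n*min_height)
--     min_cost = cost
--
--     # for h in range(min_height+1, max_height+1):
--     #     lower = bisect_left(flatten_land, h)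
--     #     cost += P*lower - Q*(n - lower)
--     #     min_cost = cost if cost < min_cost else min_cost
--     for i,h in enumerate(flatten_land[1:],start=1):
--         if h == flatten_land[i-1]:
--             continue
--         cost += P*i*(h-flatten_land[i-1]) - Q*(n- i)*(h-flatten_land[i-1])
--         min_cost = cost if cost < min_cost else min_cost
--     return min_cost
-- ===== SOURCE B (Python) =====
-- def solution(land, P, Q):
--     heights = sorted(x for row in land for x in row)
--     n = len(heights)
--     prefix = [0]
--     for h in heights:
--         prefix.append(prefix[-1] + h)
--     total = prefix[n]
--     best = None
--     for i in range(n):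
--         h = heights[i]
--         if i > 0 and h == heights[i - 1]:
--             continue
--         below = prefix[i]
--         cost = P * (i * h - below) + Q * ((total - below) - (n - i) * h)
--         if best is None or cost < best:
--             best = cost
--     return best
-- ===== Notes on version B (the rewrite author's own statement) =====
-- stated objective: alternative
-- what changed: Replaces A's incremental delta-accumulation of the levelling cost along the sorted heights with an independent recomputation of each candidate height's cost from a prefix-sum table (cost = P*(below*h - below_sum) + Q*(above_sum - above*h)), keeping only a running minimum.
import Mathlib
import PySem

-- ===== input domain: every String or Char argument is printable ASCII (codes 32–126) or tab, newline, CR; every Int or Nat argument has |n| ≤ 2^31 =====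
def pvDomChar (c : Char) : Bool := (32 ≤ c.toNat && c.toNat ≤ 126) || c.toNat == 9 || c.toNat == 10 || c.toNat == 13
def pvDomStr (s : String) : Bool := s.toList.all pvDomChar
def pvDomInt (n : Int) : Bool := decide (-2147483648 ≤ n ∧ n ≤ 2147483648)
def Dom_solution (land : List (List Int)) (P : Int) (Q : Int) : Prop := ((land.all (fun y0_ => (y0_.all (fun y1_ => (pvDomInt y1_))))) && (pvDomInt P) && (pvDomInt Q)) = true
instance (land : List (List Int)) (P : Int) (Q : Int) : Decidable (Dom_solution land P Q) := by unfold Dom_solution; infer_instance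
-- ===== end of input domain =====

-- B recomputes each candidate cost from a prefix-sum table instead of A's incremental delta accumulation; same O(n log n) cost (objective: alternative).

-- ===== PORT A =====
-- loop body of A's for-loop over enumerate(flatten_land[1:], start=1); state = (cost, min_cost), p = (i, h)
def solAStep (s : List Int) (P Q n : Int) (st : Int × Int) (p : Int × Int) : Int × Int :=
  if p.2 = PySem.List.pyGetD s (p.1 - 1) 0 then st
  else
    let cost' := st.1 + P * p.1 * (p.2 - PySem.List.pyGetD s (p.1 - 1) 0)
                      - Q * (n - p.1) * (p.2 - PySem.List.pyGetD s (p.1 - 1) 0)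
    (cost', if cost' < st.2 then cost' else st.2)

def solution (land : List (List Int)) (P : Int) (Q : Int) : Int :=
  let flatten := land.foldl (fun acc row => acc ++ row) []   -- flatten_land += row
  let n : Int := flatten.length
  let s := PySem.List.sorted flatten (fun x => x) false       -- flatten_land = sorted(flatten_land)
  let total := s.sum
  let minH := PySem.List.pyGetD s 0 0                         -- flatten_land[0]; IndexError on empty land excluded by Pre_
  let _maxH := PySem.List.pyGetD s (-1) 0                     -- max_height (unused by A)
  let cost := Q * (total - n * minH)
  let r := (PySem.List.enumerate (PySem.List.slice s (some 1) none) 1).foldl (solAStep s P Q n) (cost, cost)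
  r.2

-- ===== PORT B =====
-- loop body of B's for-loop over range(n); state = best : Option Int
def solBStep (heights prefixL : List Int) (P Q n total : Int) (best : Option Int) (i : Int) : Option Int :=
  let h := PySem.List.pyGetD heights i 0
  if 0 < i ∧ h = PySem.List.pyGetD heights (i - 1) 0 then best
  else
    let below := PySem.List.pyGetD prefixL i 0
    let cost := P * (i * h - below) + Q * ((total - below) - (n - i) * h)
    match best with
    | none => some cost
    | some b => some (if cost < b then cost else b)

def solution_alt (land : List (List Int)) (P : Int) (Q : Int) : Int :=
  let heights := PySem.List.sorted (land.flatMap id) (fun x => x) false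
  let n : Int := heights.length
  let prefixL := heights.foldl (fun acc h => acc ++ [PySem.List.pyGetD acc (-1) 0 + h]) [0]  -- prefix.append(prefix[-1]+h)
  let total := PySem.List.pyGetD prefixL n 0
  let best := (PySem.List.pyRange 0 n 1).foldl (solBStep heights prefixL P Q n total) none
  best.getD 0   -- Python B returns None on empty land, which is outside Pre_

-- ===== PRECONDITION & SPEC =====
-- Pre_ excludes exactly empty land (no blocks): there A raises IndexError on flatten_land[0].
def Pre_solution (land : List (List Int)) (P : Int) (Q : Int) : Prop := land.flatMap id ≠ []
instance (land : List (List Int)) (P : Int) (Q : Int) : Decidable (Pre_solution land P Q) := by unfold Pre_solution; infer_instance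
def pvWitness_solution : List (List Int) × Int × Int := ([[1, 2], [3, 1]], 2, 3)

def Spec_solution (land : List (List Int)) (P : Int) (Q : Int) (out : Int) : Prop := out = solution_alt land P Q
instance (land : List (List Int)) (P : Int) (Q : Int) (out : Int) : Decidable (Spec_solution land P Q out) := by unfold Spec_solution; infer_instance

-- ===== CLAIM (what is proved, stated in full; the proofs are below) =====
def Claim_equal_solution : Prop := ∀ (land : List (List Int)) (P : Int) (Q : Int), Dom_solution land P Q → Pre_solution land P Q → Spec_solution land P Q (solution land P Q)

-- ===== LEMMAS AND PROOFS =====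

-- sum of the first k sorted heights
def preS (s : List Int) (k : Nat) : Int := (s.take k).sum

-- the exact cost of levelling everything to height s[k] (B's closed form at index k)
def gC (s : List Int) (P Q : Int) (k : Nat) : Int :=
  P * ((k : Int) * s.getD k 0 - preS s k) +
  Q * ((s.sum - preS s k) - ((s.length : Int) - (k : Int)) * s.getD k 0)

lemma flatten_eq (land : List (List Int)) :
    land.foldl (fun acc row => acc ++ row) [] = land.flatMap id := by
  suffices h : ∀ init : List Int, land.foldl (fun acc row => acc ++ row) init = init ++ land.flatMap id by
    simpa using h []
  induction land with
  | nil => simp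
  | cons r t ih => intro init; simp [List.foldl_cons, ih, List.append_assoc]

lemma build_prefix (s : List Int) : ∀ (A : List Int) (c : Int),
    s.foldl (fun acc h => acc ++ [PySem.List.pyGetD acc (-1) 0 + h]) (A ++ [c])
      = A ++ List.scanl (· + ·) c s := by
  induction s with
  | nil => intro A c; simp [List.scanl]
  | cons h t ih =>
    intro A c
    rw [List.foldl_cons, PySem.List.pyGetD_neg_one_append_singleton,
      ih (A ++ [c]) (c + h), List.append_assoc, List.scanl_cons]
    simp

lemma scanl_getD (s : List Int) : ∀ (c : Int) (k : Nat), k ≤ s.length →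
    (List.scanl (· + ·) c s).getD k 0 = c + (s.take k).sum := by
  induction s with
  | nil =>
    intro c k hk
    simp only [List.length_nil, Nat.le_zero] at hk
    subst hk
    simp [List.scanl_nil]
  | cons h t ih =>
    intro c k hk
    cases k with
    | zero => simp [List.scanl_cons]
    | succ k =>
      rw [List.scanl_cons]
      simp only [List.getD_cons_succ, List.take_succ_cons, List.sum_cons]
      rw [ih (c + h) k (by simpa using hk)]
      ring

lemma preS_succ (s : List Int) (k : Nat) (hk : k < s.length) :
    preS s (k + 1) = preS s k + s.getD k 0 := by
  unfold preS
  rw [List.sum_take_succ s k hk, List.getD_eq_getElem s 0 hk]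

lemma g_zero (s : List Int) (P Q : Int) :
    gC s P Q 0 = Q * (s.sum - (s.length : Int) * s.getD 0 0) := by
  unfold gC preS
  simp only [List.take_zero, List.sum_nil]
  ring

lemma g_succ (s : List Int) (P Q : Int) (k : Nat) (hk : k + 1 < s.length) :
    gC s P Q (k + 1) = gC s P Q k
      + P * ((k + 1 : Nat) : Int) * (s.getD (k + 1) 0 - s.getD k 0)
      - Q * ((s.length : Int) - ((k + 1 : Nat) : Int)) * (s.getD (k + 1) 0 - s.getD k 0) := by
  unfold gC
  rw [preS_succ s k (by omega)]
  push_cast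
  ring

lemma enum_eq (s : List Int) (k : Nat) :
    PySem.List.enumerate (s.drop k) (k : Int)
      = (PySem.List.pyRange (k : Int) (s.length : Int) 1).map
          (fun j => (j, PySem.List.pyGetD s j 0)) := by
  by_cases h : k < s.length
  · rw [List.drop_eq_getElem_cons h, PySem.List.enumerate_cons,
      PySem.List.pyRange_one_cons (by exact_mod_cast h), List.map_cons]
    have h1 : PySem.List.pyGetD s (k : Int) 0 = s[k] := by
      rw [PySem.List.pyGetD_natCast]; exact List.getD_eq_getElem s 0 h
    have h2 := enum_eq s (k + 1)
    push_cast at h2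
    rw [h2, h1]
  · rw [List.drop_eq_nil_of_le (by omega), PySem.List.pyRange_one_eq_nil (by exact_mod_cast (by omega : s.length ≤ k))]
    simp [PySem.List.enumerate]
termination_by s.length - k

lemma solAStep_apply (s : List Int) (P Q n cost mc i h : Int) :
    solAStep s P Q n (cost, mc) (i, h) =
      if h = PySem.List.pyGetD s (i - 1) 0 then (cost, mc)
      else (cost + P * i * (h - PySem.List.pyGetD s (i - 1) 0) - Q * (n - i) * (h - PySem.List.pyGetD s (i - 1) 0),
            if cost + P * i * (h - PySem.List.pyGetD s (i - 1) 0) - Q * (n - i) * (h - PySem.List.pyGetD s (i - 1) 0) < mc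
            then cost + P * i * (h - PySem.List.pyGetD s (i - 1) 0) - Q * (n - i) * (h - PySem.List.pyGetD s (i - 1) 0)
            else mc) := rfl

lemma solBStep_apply (heights prefixL : List Int) (P Q n total : Int) (best : Option Int) (i : Int) :
    solBStep heights prefixL P Q n total best i =
      if 0 < i ∧ PySem.List.pyGetD heights i 0 = PySem.List.pyGetD heights (i - 1) 0 then best
      else
        match best with
        | none => some (P * (i * PySem.List.pyGetD heights i 0 - PySem.List.pyGetD prefixL i 0)
            + Q * ((total - PySem.List.pyGetD prefixL i 0) - (n - i) * PySem.List.pyGetD heights i 0))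
        | some b => some (if P * (i * PySem.List.pyGetD heights i 0 - PySem.List.pyGetD prefixL i 0)
            + Q * ((total - PySem.List.pyGetD prefixL i 0) - (n - i) * PySem.List.pyGetD heights i 0) < b
            then P * (i * PySem.List.pyGetD heights i 0 - PySem.List.pyGetD prefixL i 0)
            + Q * ((total - PySem.List.pyGetD prefixL i 0) - (n - i) * PySem.List.pyGetD heights i 0)
            else b) := rfl

lemma loop_eq (s : List Int) (P Q : Int) (k : Nat) (m : Int) (hk1 : 1 ≤ k) (hk2 : k ≤ s.length) :
    (((PySem.List.pyRange (k : Int) (s.length : Int) 1).map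
        (fun j => (j, PySem.List.pyGetD s j 0))).foldl
        (solAStep s P Q (s.length : Int)) (gC s P Q (k - 1), m)).2
    = ((PySem.List.pyRange (k : Int) (s.length : Int) 1).foldl
        (solBStep s (List.scanl (· + ·) 0 s) P Q (s.length : Int) s.sum) (some m)).getD 0 := by
  by_cases h : k < s.length
  · rw [PySem.List.pyRange_one_cons (by exact_mod_cast h), List.map_cons, List.foldl_cons,
      List.foldl_cons, solAStep_apply, solBStep_apply]
    have hc : (k : Int) - 1 = ((k - 1 : Nat) : Int) := by omega
    have hgk : PySem.List.pyGetD s (k : Int) 0 = s.getD k 0 := PySem.List.pyGetD_natCast s k 0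
    have hgk1 : PySem.List.pyGetD s ((k : Int) - 1) 0 = s.getD (k - 1) 0 := by
      rw [hc, PySem.List.pyGetD_natCast]
    have hbelow : PySem.List.pyGetD (List.scanl (· + ·) 0 s) (k : Int) 0 = preS s k := by
      rw [PySem.List.pyGetD_natCast, scanl_getD s 0 k (by omega)]
      simp [preS]
    have hcast : (k : Int) + 1 = ((k + 1 : Nat) : Int) := by omega
    have hsucc := g_succ s P Q (k - 1) (by omega)
    rw [(by omega : k - 1 + 1 = k)] at hsucc
    by_cases heq : PySem.List.pyGetD s (k : Int) 0 = PySem.List.pyGetD s ((k : Int) - 1) 0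
    · have heq' : s.getD k 0 = s.getD (k - 1) 0 := by rw [← hgk, ← hgk1]; exact heq
      rw [if_pos heq, if_pos ⟨by exact_mod_cast hk1, heq⟩]
      have hg : gC s P Q (k - 1) = gC s P Q k := by rw [hsucc, heq']; ring
      have hIH' := loop_eq s P Q (k + 1) m (by omega) (by omega)
      rw [(by omega : k + 1 - 1 = k), ← hcast] at hIH'
      rw [hg]
      exact hIH'
    · have heq' : ¬ s.getD k 0 = s.getD (k - 1) 0 := by rw [← hgk, ← hgk1]; exact heq
      have hnot : ¬ ((0:Int) < (k:Int) ∧ PySem.List.pyGetD s (k:Int) 0 = PySem.List.pyGetD s ((k:Int) - 1) 0) :=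
        fun hcon => heq hcon.2
      rw [if_neg heq, if_neg hnot, hgk, hgk1, hbelow]
      have hval : gC s P Q (k - 1)
          + P * (k : Int) * (s.getD k 0 - s.getD (k - 1) 0)
          - Q * ((s.length : Int) - (k : Int)) * (s.getD k 0 - s.getD (k - 1) 0)
          = gC s P Q k := hsucc.symm
      have hcost : P * ((k : Int) * s.getD k 0 - preS s k)
          + Q * ((s.sum - preS s k) - ((s.length : Int) - (k : Int)) * s.getD k 0)
          = gC s P Q k := rfl
      rw [hval, hcost]
      have hIH' := loop_eq s P Q (k + 1) (if gC s P Q k < m then gC s P Q k else m) (by omega) (by omega)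
      rw [(by omega : k + 1 - 1 = k), ← hcast] at hIH'
      exact hIH'
  · rw [PySem.List.pyRange_one_eq_nil (by exact_mod_cast (by omega : s.length ≤ k))]
    simp
termination_by s.length - k

theorem solution_spec : Claim_equal_solution := by
  intro land P Q _hdom hpre
  unfold Spec_solution
  simp only [solution, solution_alt]
  rw [flatten_eq]
  set s := PySem.List.sorted (land.flatMap id) (fun x => x) false with hs
  have hlen : (land.flatMap id).length = s.length := (PySem.List.length_sorted _ _ _).symm
  rw [hlen]
  have hne : s ≠ [] := fun hnil => hpre ((PySem.List.sorted_eq_nil_iff _ _ _).mp (hs ▸ hnil))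
  have hpos : 0 < s.length := List.length_pos_iff.mpr hne
  have hbuild : s.foldl (fun acc h => acc ++ [PySem.List.pyGetD acc (-1) 0 + h]) [0]
      = List.scanl (· + ·) 0 s := by
    have := build_prefix s [] 0
    simpa using this
  have htotal : PySem.List.pyGetD (List.scanl (· + ·) 0 s) (s.length : Int) 0 = s.sum := by
    rw [PySem.List.pyGetD_natCast, scanl_getD s 0 s.length le_rfl]
    simp
  have hcost0 : Q * (s.sum - (s.length : Int) * PySem.List.pyGetD s 0 0) = gC s P Q 0 := by
    rw [PySem.List.pyGetD_zero, g_zero]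
  have hsl : PySem.List.slice s (some 1) none = s.drop 1 := by
    rw [PySem.List.slice_from_one, List.drop_one]
  have henum : PySem.List.enumerate (PySem.List.slice s (some 1) none) 1
      = (PySem.List.pyRange ((1 : Nat) : Int) (s.length : Int) 1).map
          (fun j => (j, PySem.List.pyGetD s j 0)) := by
    rw [hsl]
    exact_mod_cast enum_eq s 1
  have hrange : PySem.List.pyRange 0 (s.length : Int) 1
      = (0 : Int) :: PySem.List.pyRange 1 (s.length : Int) 1 :=
    PySem.List.pyRange_one_cons (by exact_mod_cast hpos)
  have hfirst : solBStep s (List.scanl (· + ·) 0 s) P Q (s.length : Int) s.sum none 0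
      = some (gC s P Q 0) := by
    rw [solBStep_apply]
    rw [if_neg (by simp)]
    have hb0 : PySem.List.pyGetD (List.scanl (· + ·) 0 s) (0 : Int) 0 = 0 := by
      rw [PySem.List.pyGetD_zero]; cases s <;> simp [List.scanl_cons]
    rw [hb0, PySem.List.pyGetD_zero]
    refine congrArg some ?_
    unfold gC preS
    simp only [List.take_zero, List.sum_nil]
    push_cast
    ring
  rw [hbuild, htotal, henum, hrange, List.foldl_cons, hfirst, hcost0]
  have hmain := loop_eq s P Q 1 (gC s P Q 0) le_rfl hpos
  simpa using hmain
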